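-- pv_equiv track=rewrite | github.com/pajanowski/adventofcode2021 | day3/day_3.py | get_epsilon_rate
-- ===== SOURCE A (Python) =====
-- def get_epsilon_rate(bits_array):
--     epsilon_rate_bits = ''
--     for i in range(0, len(bits_array[0])):
--         count_0 = 0
--         count_1 = 0
--         for bits in bits_array:
--             if bits[i] == '1':
--                 count_1 += 1
--             if bits[i] == '0':
--                 count_0 += 1
--         if count_0 > count_1:
--             epsilon_rate_bits += '1'
--         else:
--             epsilon_rate_bits += '0'
--     return bits_to_int(epsilon_rate_bits)
--
-- def bits_to_int(bits):
--     out = 0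
--     for bit in bits:
--         out = (out << 1) | int(bit)
--     return out
-- ===== SOURCE B (Python) =====
-- def get_epsilon_rate(bits_array):
--     m = len(bits_array[0])
--     counts = [(0, 0)] * m
--     for bits in bits_array:
--         counts = [(c0 + (bits[i] == '0'), c1 + (bits[i] == '1'))
--                   for i, (c0, c1) in enumerate(counts)]
--     out = 0
--     for c0, c1 in counts:
--         out = out * 2 + (1 if c0 > c1 else 0)
--     return out
-- ===== Notes on version B (the rewrite author's own statement) =====
-- stated objective: alternative
-- what changed: A scans all rows once per column and builds an intermediate bit string converted by bits_to_int; B makes one sweep over the rows maintaining a per-column (count0,count1) table and then folds that table directly into the integer with out = out*2 + bit, no intermediate string.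
import Mathlib
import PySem

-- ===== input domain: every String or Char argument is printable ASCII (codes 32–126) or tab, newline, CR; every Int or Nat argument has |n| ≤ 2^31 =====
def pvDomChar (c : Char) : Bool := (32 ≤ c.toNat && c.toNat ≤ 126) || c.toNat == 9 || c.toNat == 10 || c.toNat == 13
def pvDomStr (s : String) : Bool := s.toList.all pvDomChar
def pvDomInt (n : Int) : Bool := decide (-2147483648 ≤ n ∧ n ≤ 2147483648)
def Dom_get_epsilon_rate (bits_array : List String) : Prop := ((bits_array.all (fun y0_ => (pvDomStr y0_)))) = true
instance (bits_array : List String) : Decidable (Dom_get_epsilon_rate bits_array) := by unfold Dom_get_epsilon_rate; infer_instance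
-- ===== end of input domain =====

-- B replaces A's column-outer rescan (scan all rows once per column) by one sweep over the rows
-- maintaining a per-column (count0, count1) table, then folds that table directly into the integer
-- (no intermediate bit string); objective: alternative decomposition of the same O(n·m) work.

-- ===== PORT A =====
-- helper bits_to_int of A; Python does (out << 1) | int(bit), which for bit ∈ {'0','1'}
-- (the only characters A ever passes in) equals out * 2 + bit-value — exact here.
def bits_to_int (bits : List Char) : Int :=
  bits.foldl (fun out bit => out * 2 + (if bit = '1' then 1 else 0)) 0

def get_epsilon_rate (bits_array : List String) : Int :=
  -- bits_array[0]: Pre_ excludes the empty list, where Python raises IndexError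
  let row0 := bits_array.head?.getD ""
  let eps := (List.range row0.toList.length).foldl (fun (acc : List Char) (i : Nat) =>
      let c := bits_array.foldl (fun (p : Int × Int) bits =>
          -- bits[i]: in range for every row under Pre_ (Python raises IndexError otherwise)
          let ch := (PySem.Str.pyGet? bits (i : Int)).getD ' '
          let count_1 := if ch = '1' then p.2 + 1 else p.2
          let count_0 := if ch = '0' then p.1 + 1 else p.1
          (count_0, count_1)) (0, 0)
      if c.1 > c.2 then acc ++ ['1'] else acc ++ ['0']) ([] : List Char)
  bits_to_int eps

-- ===== PORT B =====
def get_epsilon_rate_alt (bits_array : List String) : Int :=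
  -- len(bits_array[0]): Pre_ excludes the empty list (IndexError)
  let m := (bits_array.head?.getD "").toList.length
  let counts := bits_array.foldl (fun (cs : List (Int × Int)) bits =>
      (PySem.List.enumerate cs).map (fun p =>
        (p.2.1 + (if (PySem.Str.pyGet? bits p.1).getD ' ' = '0' then 1 else 0),
         p.2.2 + (if (PySem.Str.pyGet? bits p.1).getD ' ' = '1' then 1 else 0))))
      (List.replicate m ((0 : Int), (0 : Int)))
  counts.foldl (fun out c => out * 2 + (if c.1 > c.2 then 1 else 0)) 0

-- ===== PRECONDITION & SPEC =====
-- Pre_ excludes exactly the inputs where Python A raises IndexError: the empty list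
-- (bits_array[0]) and lists with a row shorter than the first row (bits[i]).
def Pre_get_epsilon_rate (bits_array : List String) : Prop :=
  bits_array ≠ [] ∧
    ∀ s ∈ bits_array, (bits_array.head?.getD "").toList.length ≤ s.toList.length
instance (bits_array : List String) : Decidable (Pre_get_epsilon_rate bits_array) := by
  unfold Pre_get_epsilon_rate; infer_instance

def pvWitness_get_epsilon_rate : List String := ["01", "10", "11"]

def Spec_get_epsilon_rate (bits_array : List String) (out : Int) : Prop := out = get_epsilon_rate_alt bits_array
instance (bits_array : List String) (out : Int) : Decidable (Spec_get_epsilon_rate bits_array out) := by unfold Spec_get_epsilon_rate; infer_instance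

-- ===== CLAIM (what is proved, stated in full; the proofs are below) =====
def Claim_equal_get_epsilon_rate : Prop := ∀ (bits_array : List String), Dom_get_epsilon_rate bits_array → Pre_get_epsilon_rate bits_array → Spec_get_epsilon_rate bits_array (get_epsilon_rate bits_array)

-- ===== LEMMAS AND PROOFS =====

-- the common per-column counting step both programs perform (reading row `bits` at column i)
def colStep (i : Int) (p : Int × Int) (bits : String) : Int × Int :=
  (p.1 + (if (PySem.Str.pyGet? bits i).getD ' ' = '0' then 1 else 0),
   p.2 + (if (PySem.Str.pyGet? bits i).getD ' ' = '1' then 1 else 0))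

-- A's inner-loop body is colStep
lemma colStep_eq_A (i : Int) (p : Int × Int) (bits : String) :
    (let ch := (PySem.Str.pyGet? bits i).getD ' '
     let count_1 := if ch = '1' then p.2 + 1 else p.2
     let count_0 := if ch = '0' then p.1 + 1 else p.1
     ((count_0, count_1) : Int × Int)) = colStep i p bits := by
  simp only [colStep]
  split_ifs <;> simp_all

-- B's per-row update, named for the proofs
def rowStep (cs : List (Int × Int)) (bits : String) : List (Int × Int) :=
  (PySem.List.enumerate cs).map (fun p =>
    (p.2.1 + (if (PySem.Str.pyGet? bits p.1).getD ' ' = '0' then 1 else 0),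
     p.2.2 + (if (PySem.Str.pyGet? bits p.1).getD ' ' = '1' then 1 else 0)))

lemma length_map_enumerate {α β : Type} (g : Int × α → β) (cs : List α) (k : Int) :
    ((PySem.List.enumerate cs k).map g).length = cs.length := by
  induction cs generalizing k with
  | nil => simp [PySem.List.enumerate]
  | cons x xs ih => simp [PySem.List.enumerate, ih]

lemma map_enumerate_getElem {α β : Type} (g : Int × α → β) (cs : List α) (k : Int)
    (i : Nat) (h : i < cs.length) :
    ((PySem.List.enumerate cs k).map g)[i]'(by rw [length_map_enumerate]; exact h)
      = g ((k + i : Int), cs[i]) := by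
  induction cs generalizing k i with
  | nil => simp at h
  | cons x xs ih =>
    cases i with
    | zero => simp [PySem.List.enumerate]
    | succ j =>
      have hj : j < xs.length := by simpa using h
      simp only [PySem.List.enumerate, List.map_cons, List.getElem_cons_succ]
      rw [ih (k + 1) j hj]
      congr 1
      push_cast
      ring_nf

lemma rowStep_length (cs : List (Int × Int)) (bits : String) :
    (rowStep cs bits).length = cs.length := by
  simp [rowStep]

lemma rowStep_getElem (cs : List (Int × Int)) (bits : String) (i : Nat) (h : i < cs.length) :
    (rowStep cs bits)[i]'(by rw [rowStep_length]; exact h) = colStep (i : Int) cs[i] bits := by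
  simp only [rowStep]
  rw [map_enumerate_getElem _ cs 0 i h]
  simp [colStep]

lemma counts_length (L : List String) (cs : List (Int × Int)) :
    (L.foldl rowStep cs).length = cs.length := by
  induction L generalizing cs with
  | nil => rfl
  | cons s L ih => simp [List.foldl_cons, ih, rowStep_length]

lemma counts_getElem (L : List String) (cs : List (Int × Int)) (i : Nat) (h : i < cs.length) :
    (L.foldl rowStep cs)[i]'(by rw [counts_length]; exact h)
      = L.foldl (colStep (i : Int)) cs[i] := by
  induction L generalizing cs with
  | nil => rfl
  | cons s L ih =>
    simp only [List.foldl_cons]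
    rw [ih (rowStep cs s) (by rw [rowStep_length]; exact h), rowStep_getElem cs s i h]

-- the counts table after the sweep is the per-column fold, column by column
lemma counts_eq_map_range (L : List String) (m : Nat) :
    L.foldl rowStep (List.replicate m ((0 : Int), (0 : Int)))
      = (List.range m).map (fun i : Nat => L.foldl (colStep (i : Int)) ((0 : Int), (0 : Int))) := by
  apply List.ext_getElem
  · rw [counts_length]; simp
  · intro i h₁ h₂
    have hm : i < m := by
      rw [counts_length, List.length_replicate] at h₁; exact h₁
    rw [counts_getElem L _ i (by simpa using hm), List.getElem_map, List.getElem_range,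
      List.getElem_replicate]

-- both results equal the same fold over the column indices
lemma common_form (bits_array : List String) (m : Nat) :
    bits_to_int ((List.range m).foldl (fun (acc : List Char) (i : Nat) =>
        let c := bits_array.foldl (fun (p : Int × Int) bits =>
            let ch := (PySem.Str.pyGet? bits (i : Int)).getD ' '
            let count_1 := if ch = '1' then p.2 + 1 else p.2
            let count_0 := if ch = '0' then p.1 + 1 else p.1
            (count_0, count_1)) (0, 0)
        if c.1 > c.2 then acc ++ ['1'] else acc ++ ['0']) ([] : List Char))
      = ((List.range m).map (fun i : Nat => bits_array.foldl (colStep (i : Int)) ((0 : Int), (0 : Int)))).foldl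
          (fun out c => out * 2 + (if c.1 > c.2 then 1 else 0)) 0 := by
  have hstep : ∀ i : Nat, (fun (p : Int × Int) (bits : String) =>
      let ch := (PySem.Str.pyGet? bits (i : Int)).getD ' '
      let count_1 := if ch = '1' then p.2 + 1 else p.2
      let count_0 := if ch = '0' then p.1 + 1 else p.1
      ((count_0, count_1) : Int × Int)) = colStep (i : Int) := fun i =>
    funext fun p => funext fun bits => colStep_eq_A _ p bits
  have houter : (fun (acc : List Char) (i : Nat) =>
      let c := bits_array.foldl (fun (p : Int × Int) bits =>
          let ch := (PySem.Str.pyGet? bits (i : Int)).getD ' '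
          let count_1 := if ch = '1' then p.2 + 1 else p.2
          let count_0 := if ch = '0' then p.1 + 1 else p.1
          (count_0, count_1)) (0, 0)
      if c.1 > c.2 then acc ++ ['1'] else acc ++ ['0'])
      = fun (acc : List Char) (i : Nat) =>
        acc ++ [if (bits_array.foldl (colStep (i : Int)) (0, 0)).1
                  > (bits_array.foldl (colStep (i : Int)) (0, 0)).2 then '1' else '0'] := by
    funext acc i
    rw [hstep i]
    by_cases hc : (bits_array.foldl (colStep (i : Int)) (0, 0)).1
        > (bits_array.foldl (colStep (i : Int)) (0, 0)).2 <;> simp [hc]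
  rw [houter, PySem.List.foldl_append_singleton_eq_map]
  simp only [bits_to_int, List.nil_append, List.foldl_map]
  congr 1
  funext out i
  by_cases hc : (bits_array.foldl (colStep (i : Int)) (0, 0)).1
      > (bits_array.foldl (colStep (i : Int)) (0, 0)).2 <;> simp [hc]

-- ===== VERDICT (by name: the statement is the Claim_ definition above) =====
theorem get_epsilon_rate_spec : Claim_equal_get_epsilon_rate := by
  intro bits_array _ _
  show get_epsilon_rate bits_array = get_epsilon_rate_alt bits_array
  simp only [get_epsilon_rate, get_epsilon_rate_alt]
  rw [show (fun (cs : List (Int × Int)) (bits : String) =>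
      (PySem.List.enumerate cs).map (fun p =>
        (p.2.1 + (if (PySem.Str.pyGet? bits p.1).getD ' ' = '0' then 1 else 0),
         p.2.2 + (if (PySem.Str.pyGet? bits p.1).getD ' ' = '1' then 1 else 0)))) = rowStep
    from rfl, counts_eq_map_range]
  exact common_form bits_array _
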